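-- pv_equiv track=rewrite | github.com/Szoul/Advent_of_Code_2021 | Advent_5.py | add_one_line_of_vents_to_coordinate_system
-- ===== SOURCE A (Python) =====
-- def add_one_line_of_vents_to_coordinate_system(vent_line, c_system):
--     x_one_pos, y_one_pos = vent_line[0]
--     x_two_pos, y_two_pos = vent_line[1]
--
--     if x_one_pos == x_two_pos:
--         if y_two_pos > y_one_pos:
--             direction = 1
--         else:
--             direction = -1
--         for y in range(y_one_pos, (y_two_pos+direction), direction):
--             c_system[x_one_pos][y] += 1
--
--     elif y_one_pos == y_two_pos:
--         if x_two_pos > x_one_pos: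
--             direction = 1
--         else:
--             direction = -1
--         for x in range(x_one_pos, (x_two_pos+direction), direction):
--             c_system[x][y_one_pos] += 1
--
--     # this assumes that the x difference and the y difference is always equally large, meaning
--     # that every point on the diagonal line is also a point in the coordinate system
--     # (line is 45 degrees to horizontal/vertical lines)
--     else:
--         if x_one_pos > x_two_pos:
--             x_direction = -1
--         else:
--             x_direction = 1
--         if y_one_pos > y_two_pos:
--             y_direction = 1
--         else:
--             y_direction = -1
--
--         difference = (y_one_pos-y_two_pos)
--         iteration = 0
--         for x_position in range(x_one_pos, (x_two_pos+x_direction), x_direction):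
--             y_position = y_two_pos+difference+iteration
--             iteration -= y_direction
--             c_system[x_position][y_position] += 1
--
--     return c_system
-- ===== SOURCE B (Python) =====
-- def add_one_line_of_vents_to_coordinate_system(vent_line, c_system):
--     # Single generalized line walk instead of three separate branch loops.
--     # Equivalence is about the return value; like A, this mutates c_system in place.
--     x_one_pos, y_one_pos = vent_line[0]
--     x_two_pos, y_two_pos = vent_line[1]
--     dx = 1 if x_two_pos > x_one_pos else (-1 if x_two_pos < x_one_pos else 0)
--     dy = 1 if y_two_pos > y_one_pos else (-1 if y_two_pos < y_one_pos else 0)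
--     n = abs(y_two_pos - y_one_pos) if x_one_pos == x_two_pos else abs(x_two_pos - x_one_pos)
--     for i in range(n + 1):
--         c_system[x_one_pos + dx * i][y_one_pos + dy * i] += 1
--     return c_system
-- ===== Notes on version B (the rewrite author's own statement) =====
-- stated objective: simpler
-- what changed: Replaces A's three separate branch loops (vertical, horizontal, and a diagonal loop driven by a mutable 'iteration' counter) by one generalized walk: signs dx,dy and a step count n computed once, then a single loop incrementing c_system[x1+dx*i][y1+dy*i].
import Mathlib
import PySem

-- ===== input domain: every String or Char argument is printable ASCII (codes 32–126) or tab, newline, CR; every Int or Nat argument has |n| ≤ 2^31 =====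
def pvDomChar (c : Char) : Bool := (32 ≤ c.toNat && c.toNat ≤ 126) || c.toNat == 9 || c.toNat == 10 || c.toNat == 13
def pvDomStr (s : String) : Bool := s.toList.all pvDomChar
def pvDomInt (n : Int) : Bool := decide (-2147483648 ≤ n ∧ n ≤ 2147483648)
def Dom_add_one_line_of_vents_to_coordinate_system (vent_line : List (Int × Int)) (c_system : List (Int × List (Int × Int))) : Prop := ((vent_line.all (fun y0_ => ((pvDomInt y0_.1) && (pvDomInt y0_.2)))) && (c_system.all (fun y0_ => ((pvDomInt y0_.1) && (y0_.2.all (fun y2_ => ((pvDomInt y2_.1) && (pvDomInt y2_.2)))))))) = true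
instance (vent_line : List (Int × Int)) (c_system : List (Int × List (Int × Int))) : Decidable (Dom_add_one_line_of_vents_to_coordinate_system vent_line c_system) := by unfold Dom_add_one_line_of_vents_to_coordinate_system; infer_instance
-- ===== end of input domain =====

-- B merges A's three branch loops (vertical / horizontal / diagonal-with-counter) into one
-- generalized line walk; equal return values (both Pythons also mutate c_system identically).

-- ===== PORT A =====
-- `row[y] += 1` on the inner association-list dict: bump the first pair with key y.
-- Exact where the key is present; Python raises KeyError where it is absent (excluded by Pre_).
def pvBumpRow (row : List (Int × Int)) (y : Int) : List (Int × Int) :=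
  match row with
  | [] => []
  | (k, v) :: rest => if k == y then (k, v + 1) :: rest else (k, v) :: pvBumpRow rest y

-- `c_system[x][y] += 1`: bump the row of the first pair with key x (KeyError cases outside Pre_).
def pvIncr (cs : List (Int × List (Int × Int))) (x y : Int) : List (Int × List (Int × Int)) :=
  match cs with
  | [] => []
  | (k, row) :: rest => if k == x then (k, pvBumpRow row y) :: rest else (k, row) :: pvIncr rest x y

def add_one_line_of_vents_to_coordinate_system (vent_line : List (Int × Int)) (c_system : List (Int × List (Int × Int))) : List (Int × List (Int × Int)) :=
  match PySem.List.pyGet? vent_line 0, PySem.List.pyGet? vent_line 1 with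
  | some (x_one_pos, y_one_pos), some (x_two_pos, y_two_pos) =>
    if x_one_pos == x_two_pos then
      let direction : Int := if y_two_pos > y_one_pos then 1 else -1
      (PySem.List.pyRange y_one_pos (y_two_pos + direction) direction).foldl
        (fun cs y => pvIncr cs x_one_pos y) c_system
    else if y_one_pos == y_two_pos then
      let direction : Int := if x_two_pos > x_one_pos then 1 else -1
      (PySem.List.pyRange x_one_pos (x_two_pos + direction) direction).foldl
        (fun cs x => pvIncr cs x y_one_pos) c_system
    else
      let x_direction : Int := if x_one_pos > x_two_pos then -1 else 1
      let y_direction : Int := if y_one_pos > y_two_pos then 1 else -1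
      let difference : Int := y_one_pos - y_two_pos
      ((PySem.List.pyRange x_one_pos (x_two_pos + x_direction) x_direction).foldl
        (fun (st : List (Int × List (Int × Int)) × Int) x_position =>
          (pvIncr st.1 x_position (y_two_pos + difference + st.2), st.2 - y_direction))
        (c_system, 0)).1
  | _, _ => c_system  -- vent_line shorter than 2: Python raises IndexError (outside Pre_)

-- ===== PORT B =====
def add_one_line_of_vents_to_coordinate_system_alt (vent_line : List (Int × Int)) (c_system : List (Int × List (Int × Int))) : List (Int × List (Int × Int)) :=
  match PySem.List.pyGet? vent_line 0 with
  | none => c_system  -- vent_line shorter than 2: Python raises IndexError (outside Pre_)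
  | some (x_one_pos, y_one_pos) =>
    match PySem.List.pyGet? vent_line 1 with
    | none => c_system  -- vent_line shorter than 2: Python raises IndexError (outside Pre_)
    | some (x_two_pos, y_two_pos) =>
      let dx : Int := if x_two_pos > x_one_pos then 1 else if x_two_pos < x_one_pos then -1 else 0
      let dy : Int := if y_two_pos > y_one_pos then 1 else if y_two_pos < y_one_pos then -1 else 0
      let n : Int := if x_one_pos == x_two_pos then ((y_two_pos - y_one_pos).natAbs : Int) else ((x_two_pos - x_one_pos).natAbs : Int)
      (PySem.List.pyRange 0 (n + 1) 1).foldl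
        (fun cs i => pvIncr cs (x_one_pos + dx * i) (y_one_pos + dy * i)) c_system

-- ===== PRECONDITION & SPEC =====
-- (x, y) lies on the vent line with start (x1, y1), unit steps (dx, dy) and n steps
-- (arithmetic test; dx, dy ∈ {-1, 0, 1} and they are not both 0 unless n = 0).
def pvOnLine (x1 y1 dx dy n x y : Int) : Bool :=
  if dx ≠ 0 then
    0 ≤ dx * (x - x1) && dx * (x - x1) ≤ n && y == y1 + dy * (dx * (x - x1))
  else if dy ≠ 0 then
    x == x1 && 0 ≤ dy * (y - y1) && dy * (y - y1) ≤ n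
  else
    x == x1 && y == y1

-- number of distinct y-keys of the row satisfying p (first pair per key, dict semantics)
def pvRowCount (row : List (Int × Int)) (seen : List Int) (p : Int → Bool) : Nat :=
  match row with
  | [] => 0
  | (y, _) :: rest =>
    if y ∈ seen then pvRowCount rest seen p
    else (if p y then 1 else 0) + pvRowCount rest (y :: seen) p

-- number of distinct cells (x, y) of the grid with f x y (first row per x-key)
def pvGridCount (cs : List (Int × List (Int × Int))) (seen : List Int) (f : Int → Int → Bool) : Nat :=
  match cs with
  | [] => 0
  | (x, row) :: rest =>
    if x ∈ seen then pvGridCount rest seen f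
    else pvRowCount row [] (f x) + pvGridCount rest (x :: seen) f

-- true iff both endpoints exist and all n+1 cells of the line are present in c_system
-- (the line's cells are pairwise distinct, so presence of all = count of distinct
-- present on-line cells reaching n+1)
def pvPreB (vent_line : List (Int × Int)) (c_system : List (Int × List (Int × Int))) : Bool :=
  match vent_line with
  | (x1, y1) :: (x2, y2) :: _ =>
    let dx : Int := if x2 > x1 then 1 else if x2 < x1 then -1 else 0
    let dy : Int := if y2 > y1 then 1 else if y2 < y1 then -1 else 0
    let n : Int := if x1 = x2 then ((y2 - y1).natAbs : Int) else ((x2 - x1).natAbs : Int)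
    pvGridCount c_system [] (pvOnLine x1 y1 dx dy n) == n.toNat + 1
  | _ => false

-- Pre_: exactly where Python A returns: two endpoints exist (else IndexError) and every
-- cell on the visited line is present in c_system (else KeyError mid-loop).
def Pre_add_one_line_of_vents_to_coordinate_system (vent_line : List (Int × Int)) (c_system : List (Int × List (Int × Int))) : Prop :=
  2 ≤ vent_line.length ∧ pvPreB vent_line c_system = true
instance (vent_line : List (Int × Int)) (c_system : List (Int × List (Int × Int))) : Decidable (Pre_add_one_line_of_vents_to_coordinate_system vent_line c_system) := by unfold Pre_add_one_line_of_vents_to_coordinate_system; infer_instance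

def pvWitness_add_one_line_of_vents_to_coordinate_system : (List (Int × Int)) × (List (Int × List (Int × Int))) :=
  ([(0, 0), (2, 2)], [(0, [(0, 5), (1, 0)]), (1, [(1, 2), (3, 0)]), (2, [(2, 7)])])

def Spec_add_one_line_of_vents_to_coordinate_system (vent_line : List (Int × Int)) (c_system : List (Int × List (Int × Int))) (out : List (Int × List (Int × Int))) : Prop := out = add_one_line_of_vents_to_coordinate_system_alt vent_line c_system
instance (vent_line : List (Int × Int)) (c_system : List (Int × List (Int × Int))) (out : List (Int × List (Int × Int))) : Decidable (Spec_add_one_line_of_vents_to_coordinate_system vent_line c_system out) := by unfold Spec_add_one_line_of_vents_to_coordinate_system; infer_instance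

-- ===== CLAIM (what is proved, stated in full; the proofs are below) =====
def Claim_equal_add_one_line_of_vents_to_coordinate_system : Prop := ∀ (vent_line : List (Int × Int)) (c_system : List (Int × List (Int × Int))), Dom_add_one_line_of_vents_to_coordinate_system vent_line c_system → Pre_add_one_line_of_vents_to_coordinate_system vent_line c_system → Spec_add_one_line_of_vents_to_coordinate_system vent_line c_system (add_one_line_of_vents_to_coordinate_system vent_line c_system)

-- ===== LEMMAS AND PROOFS =====

-- A's diagonal pair-state loop (coordinate system, iteration counter) over indices 0..m-1
-- unfolded: the counter at step k is it - y_direction * k.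
theorem pv_pairfold (gx : Nat → Int) (yb ydir : Int) (m : Nat) :
    ∀ (c : List (Int × List (Int × Int))) (it : Int),
    ((List.range m).foldl
        (fun (st : List (Int × List (Int × Int)) × Int) k =>
          (pvIncr st.1 (gx k) (yb + st.2), st.2 - ydir)) (c, it))
      = ((List.range m).foldl (fun c k => pvIncr c (gx k) (yb + it - ydir * (k : Int))) c,
         it - ydir * (m : Int)) := by
  induction m with
  | zero => intro c it; simp
  | succ m ih =>
    intro c it
    rw [List.range_succ, List.foldl_append, List.foldl_append, ih]
    simp only [List.foldl_cons, List.foldl_nil, Prod.mk.injEq]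
    refine ⟨by congr 1; ring, by push_cast; ring⟩

theorem pv_main (x1 y1 x2 y2 : Int) (rest : List (Int × Int)) (cs : List (Int × List (Int × Int))) :
    add_one_line_of_vents_to_coordinate_system ((x1, y1) :: (x2, y2) :: rest) cs
      = add_one_line_of_vents_to_coordinate_system_alt ((x1, y1) :: (x2, y2) :: rest) cs := by
  have h0 : PySem.List.pyGet? ((x1, y1) :: (x2, y2) :: rest) 0 = some (x1, y1) := by
    have h : (0:Int) ≤ (rest.length:Int) + 1 := by positivity
    simp [PySem.List.pyGet?, PySem.List.pyIdx?, h]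
  have h1 : PySem.List.pyGet? ((x1, y1) :: (x2, y2) :: rest) 1 = some (x2, y2) := by
    simp [PySem.List.pyGet?, PySem.List.pyIdx?]
  unfold add_one_line_of_vents_to_coordinate_system add_one_line_of_vents_to_coordinate_system_alt
  rw [h0, h1]
  by_cases hx : x1 = x2
  · subst hx
    by_cases hupy : y1 < y2
    · -- vertical, upward
      simp only [beq_self_eq_true, gt_iff_lt, hupy, if_true, lt_irrefl, ite_false]
      rw [PySem.List.pyRange_one, PySem.List.pyRange_one, List.foldl_map, List.foldl_map]
      rw [show (y2 + 1 - y1).toNat = (((y2 - y1).natAbs : Int) + 1 - 0).toNat by omega]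
      congr 1; funext c k; norm_num
    · by_cases hy : y1 = y2
      · subst hy
        have h2 : ¬ (y1 < y1) := lt_irrefl y1
        simp only [beq_self_eq_true, gt_iff_lt, h2, ite_false, ite_true, lt_irrefl]
        rw [PySem.List.pyRange_neg_one, PySem.List.pyRange_one, List.foldl_map, List.foldl_map]
        rw [show (y1 - (y1 + -1)).toNat = 1 by omega,
            show (((y1 - y1).natAbs : Int) + 1 - 0).toNat = 1 by omega]
        norm_num [List.range_one]
      · -- vertical, downward
        have hdn : y2 < y1 := by omega
        simp only [beq_self_eq_true, gt_iff_lt, hupy, hdn, ite_false, ite_true, lt_irrefl]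
        rw [PySem.List.pyRange_neg_one, PySem.List.pyRange_one, List.foldl_map, List.foldl_map]
        rw [show (y1 - (y2 + -1)).toNat = (((y2 - y1).natAbs : Int) + 1 - 0).toNat by omega]
        congr 1; funext c k; congr 1 <;> ring
  · by_cases hy : y1 = y2
    · subst hy
      by_cases hupx : x1 < x2
      · -- horizontal, rightward
        simp only [hx, beq_iff_eq, beq_self_eq_true, gt_iff_lt, hupx, ite_true, ite_false, lt_irrefl]
        rw [PySem.List.pyRange_one, PySem.List.pyRange_one, List.foldl_map, List.foldl_map]
        rw [show (x2 + 1 - x1).toNat = (((x2 - x1).natAbs : Int) + 1 - 0).toNat by omega]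
        congr 1; funext c k; norm_num
      · -- horizontal, leftward
        have hdn : x2 < x1 := by omega
        simp only [hx, beq_iff_eq, beq_self_eq_true, gt_iff_lt, hupx, hdn, ite_true, ite_false, lt_irrefl]
        rw [PySem.List.pyRange_neg_one, PySem.List.pyRange_one, List.foldl_map, List.foldl_map]
        rw [show (x1 - (x2 + -1)).toNat = (((x2 - x1).natAbs : Int) + 1 - 0).toNat by omega]
        congr 1; funext c k; congr 1 <;> ring
    · -- diagonal
      by_cases hupx : x1 < x2
      · by_cases hupy : y1 < y2
        · have h3 : ¬ (x2 < x1) := by omega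
          have h4 : ¬ (y2 < y1) := by omega
          simp only [hx, hy, beq_iff_eq, gt_iff_lt, hupx, hupy, h3, h4, ite_true, ite_false]
          rw [PySem.List.pyRange_one, List.foldl_map, pv_pairfold (fun k => x1 + (k : Int)),
              PySem.List.pyRange_one, List.foldl_map]
          rw [show (x2 + 1 - x1).toNat = (((x2 - x1).natAbs : Int) + 1 - 0).toNat by omega]
          dsimp only
          congr 1; funext c k; congr 1 <;> ring
        · have h4 : y2 < y1 := by omega
          have h3 : ¬ (x2 < x1) := by omega
          simp only [hx, hy, beq_iff_eq, gt_iff_lt, hupx, hupy, h3, h4, ite_true, ite_false]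
          rw [PySem.List.pyRange_one, List.foldl_map, pv_pairfold (fun k => x1 + (k : Int)),
              PySem.List.pyRange_one, List.foldl_map]
          rw [show (x2 + 1 - x1).toNat = (((x2 - x1).natAbs : Int) + 1 - 0).toNat by omega]
          dsimp only
          congr 1; funext c k; congr 1 <;> ring
      · by_cases hupy : y1 < y2
        · have h3 : x2 < x1 := by omega
          have h4 : ¬ y2 < y1 := by omega
          simp only [hx, hy, beq_iff_eq, gt_iff_lt, hupx, hupy, h3, h4, ite_true, ite_false]
          rw [PySem.List.pyRange_neg_one, List.foldl_map, pv_pairfold (fun k => x1 - (k : Int)),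
              PySem.List.pyRange_one, List.foldl_map]
          rw [show (x1 - (x2 + -1)).toNat = (((x2 - x1).natAbs : Int) + 1 - 0).toNat by omega]
          dsimp only
          congr 1; funext c k; congr 1 <;> ring
        · have h3 : x2 < x1 := by omega
          have h4 : y2 < y1 := by omega
          simp only [hx, hy, beq_iff_eq, gt_iff_lt, hupx, hupy, h3, h4, ite_true, ite_false]
          rw [PySem.List.pyRange_neg_one, List.foldl_map, pv_pairfold (fun k => x1 - (k : Int)),
              PySem.List.pyRange_one, List.foldl_map]
          rw [show (x1 - (x2 + -1)).toNat = (((x2 - x1).natAbs : Int) + 1 - 0).toNat by omega]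
          dsimp only
          congr 1; funext c k; congr 1 <;> ring

-- ===== VERDICT (by name: the statement is the Claim_ definition above) =====
theorem add_one_line_of_vents_to_coordinate_system_spec : Claim_equal_add_one_line_of_vents_to_coordinate_system := by
  intro vent_line c_system _ hpre
  unfold Spec_add_one_line_of_vents_to_coordinate_system
  match vent_line, hpre with
  | (x1, y1) :: (x2, y2) :: rest, _ => exact pv_main x1 y1 x2 y2 rest c_system
  | [], ⟨h, _⟩ => simp at h
  | [p], ⟨h, _⟩ => simp at h
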